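-- pv_equiv track=rewrite | github.com/RangelGasharov/Python_Basics | algorithms/edabit_arrow_pattern.py | arrow
-- ===== SOURCE A (Python) =====
-- def arrow(num):
--     resulting_strings = []
--     for i in range(1, num + 1):
--         arrow_string = ">" * i
--         resulting_strings.append(arrow_string)
--     for i in range(1, num):
--         arrow_string = (num - i) * ">"
--         resulting_strings.append(arrow_string)
--     return resulting_strings
-- ===== SOURCE B (Python) =====
-- def arrow(num):
--     return [">" * (num - abs(num - i)) for i in range(1, 2 * num)]
-- ===== Notes on version B (the rewrite author's own statement) =====
-- stated objective: alternative
-- what changed: B replaces A's two staged loops (ascending then descending) by a single comprehension over one range of length 2n-1 that computes each row's width directly via the closed form num - abs(num - i).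
import Mathlib
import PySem

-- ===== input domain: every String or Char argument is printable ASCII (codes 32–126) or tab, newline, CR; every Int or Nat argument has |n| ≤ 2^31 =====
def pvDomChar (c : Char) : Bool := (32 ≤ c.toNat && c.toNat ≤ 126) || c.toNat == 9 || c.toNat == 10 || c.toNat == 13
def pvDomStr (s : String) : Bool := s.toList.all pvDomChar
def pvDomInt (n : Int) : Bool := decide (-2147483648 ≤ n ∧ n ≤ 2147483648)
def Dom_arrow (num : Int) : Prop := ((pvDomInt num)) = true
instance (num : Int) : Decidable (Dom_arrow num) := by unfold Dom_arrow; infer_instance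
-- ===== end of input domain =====

-- B replaces A's two staged loops by one pass with the closed-form row width num - |num - i|.

-- ===== PORT A =====
-- ">" * i  is  String.ofList (PySem.List.pyRepeat ['>'] i)
def arrow (num : Int) : List String :=
  let resulting_strings : List String :=
    (PySem.List.pyRange 1 (num + 1) 1).foldl
      (fun acc i => acc ++ [String.ofList (PySem.List.pyRepeat ['>'] i)]) []
  (PySem.List.pyRange 1 num 1).foldl
    (fun acc i => acc ++ [String.ofList (PySem.List.pyRepeat ['>'] (num - i))]) resulting_strings

-- ===== PORT B =====
-- abs(num - i)  is  |num - i| on Int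
def arrow_alt (num : Int) : List String :=
  (PySem.List.pyRange 1 (2 * num) 1).map
    (fun i => String.ofList (PySem.List.pyRepeat ['>'] (num - |num - i|)))

-- ===== PRECONDITION & SPEC =====
def Spec_arrow (num : Int) (out : List String) : Prop := out = arrow_alt num
instance (num : Int) (out : List String) : Decidable (Spec_arrow num out) := by unfold Spec_arrow; infer_instance

-- ===== CLAIM (what is proved, stated in full; the proofs are below) =====
def Claim_equal_arrow : Prop := ∀ (num : Int), Dom_arrow num → Spec_arrow num (arrow num)

-- ===== LEMMAS AND PROOFS =====

theorem arrow_eq_alt (num : Int) : arrow num = arrow_alt num := by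
  unfold arrow arrow_alt
  simp only [PySem.List.foldl_append_singleton_eq_map, List.nil_append]
  by_cases h : 1 ≤ num
  · rw [PySem.List.pyRange_one_append 1 (num + 1) (2 * num) (by omega) (by omega),
        List.map_append]
    congr 1
    · -- ascending half: for 1 ≤ i ≤ num, |num - i| = num - i, so the width is i
      apply List.map_congr_left
      intro i hi
      rw [PySem.List.mem_pyRange_one] at hi
      have he : num - |num - i| = i := by rw [abs_of_nonneg (by omega)]; omega
      rw [he]
    · -- descending half: reindex i = num + j
      rw [PySem.List.pyRange_one, PySem.List.pyRange_one, List.map_map, List.map_map]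
      have hlen : (2 * num - (num + 1)).toNat = (num - 1).toNat := by omega
      rw [hlen]
      apply List.map_congr_left
      intro k hk
      simp only [List.mem_range] at hk
      simp only [Function.comp]
      have he : num - |num - (num + 1 + (k : Int))| = num - (1 + (k : Int)) := by
        rw [abs_of_nonpos (by omega)]; omega
      rw [he]
  · rw [PySem.List.pyRange_one_eq_nil (by omega : num + 1 ≤ 1),
        PySem.List.pyRange_one_eq_nil (by omega : num ≤ 1),
        PySem.List.pyRange_one_eq_nil (by omega : 2 * num ≤ 1)]
    simp

-- ===== VERDICT (by name: the statement is the Claim_ definition above) =====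
theorem arrow_spec : Claim_equal_arrow := by
  intro num _
  unfold Spec_arrow
  exact arrow_eq_alt num
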